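-- pv_equiv track=rewrite | github.com/suruz/cpachecker | scripts/benchmark/tools/blast.py | getStatus
-- ===== SOURCE A (Python) =====
-- def getStatus(returncode, returnsignal, output, isTimeout):
--     status = "UNKNOWN"
--     for line in output.splitlines():
--         if line.startswith('Error found! The system is unsafe :-('):
--             status = 'UNSAFE'
--         elif line.startswith('No error found.  The system is safe :-)'):
--             status = 'SAFE'
--         elif (returncode == 2) and line.startswith('Fatal error: out of memory.'):
--             status = 'OUT OF MEMORY'
--         elif (returncode == 2) and line.startswith('Fatal error: exception Sys_error("Broken pipe")'):
--             status = 'EXCEPTION'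
--         elif (returncode == 2) and line.startswith('Ack! The gremlins again!: Sys_error("Broken pipe")'):
--             status = 'TIMEOUT'
--     return status
-- ===== SOURCE B (Python) =====
-- def getStatus(returncode, returnsignal, output, isTimeout):
--     # Scan lines in reverse; first match in reverse = last match in forward order.
--     for line in reversed(output.splitlines()):
--         if line.startswith('Error found! The system is unsafe :-('):
--             return 'UNSAFE'
--         if line.startswith('No error found.  The system is safe :-)'):
--             return 'SAFE'
--         if returncode == 2:
--             if line.startswith('Fatal error: out of memory.'):
--                 return 'OUT OF MEMORY'
--             if line.startswith('Fatal error: exception Sys_error("Broken pipe")'):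
--                 return 'EXCEPTION'
--             if line.startswith('Ack! The gremlins again!: Sys_error("Broken pipe")'):
--                 return 'TIMEOUT'
--     return 'UNKNOWN'
-- ===== Notes on version B (the rewrite author's own statement) =====
-- stated objective: alternative
-- what changed: B scans the lines in reverse order and returns on the first matching line (early exit), instead of A's full forward pass that keeps overwriting a status accumulator (last match wins).
import Mathlib
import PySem

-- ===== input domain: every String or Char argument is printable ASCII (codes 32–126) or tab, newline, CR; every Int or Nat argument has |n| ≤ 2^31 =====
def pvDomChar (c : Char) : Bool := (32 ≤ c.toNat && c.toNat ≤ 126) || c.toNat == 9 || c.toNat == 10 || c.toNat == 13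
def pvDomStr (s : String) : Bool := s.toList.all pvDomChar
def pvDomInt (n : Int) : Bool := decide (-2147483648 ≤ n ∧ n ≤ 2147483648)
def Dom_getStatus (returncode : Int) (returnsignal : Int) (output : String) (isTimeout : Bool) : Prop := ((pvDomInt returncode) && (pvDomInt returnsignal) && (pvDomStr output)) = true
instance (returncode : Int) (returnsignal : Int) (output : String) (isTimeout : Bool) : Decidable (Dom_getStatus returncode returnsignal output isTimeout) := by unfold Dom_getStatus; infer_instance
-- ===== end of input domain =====

-- ===== PORT A =====
def getStatus (returncode : Int) (returnsignal : Int) (output : String) (isTimeout : Bool) : String :=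
  (PySem.Str.splitlines output).foldl (fun status line =>
    if PySem.Str.startswith line "Error found! The system is unsafe :-(" then "UNSAFE"
    else if PySem.Str.startswith line "No error found.  The system is safe :-)" then "SAFE"
    else if returncode == 2 && PySem.Str.startswith line "Fatal error: out of memory." then "OUT OF MEMORY"
    else if returncode == 2 && PySem.Str.startswith line "Fatal error: exception Sys_error(\"Broken pipe\")" then "EXCEPTION"
    else if returncode == 2 && PySem.Str.startswith line "Ack! The gremlins again!: Sys_error(\"Broken pipe\")" then "TIMEOUT"
    else status) "UNKNOWN"

-- ===== PORT B =====
-- B scans the lines back-to-front and returns at the first matching line.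
def getStatusAltLoop (returncode : Int) : List String → String
  | [] => "UNKNOWN"
  | line :: rest =>
    if PySem.Str.startswith line "Error found! The system is unsafe :-(" then "UNSAFE"
    else if PySem.Str.startswith line "No error found.  The system is safe :-)" then "SAFE"
    else if returncode == 2 then
      if PySem.Str.startswith line "Fatal error: out of memory." then "OUT OF MEMORY"
      else if PySem.Str.startswith line "Fatal error: exception Sys_error(\"Broken pipe\")" then "EXCEPTION"
      else if PySem.Str.startswith line "Ack! The gremlins again!: Sys_error(\"Broken pipe\")" then "TIMEOUT"
      else getStatusAltLoop returncode rest
    else getStatusAltLoop returncode rest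

def getStatus_alt (returncode : Int) (returnsignal : Int) (output : String) (isTimeout : Bool) : String :=
  getStatusAltLoop returncode (PySem.Str.splitlines output).reverse

-- ===== PRECONDITION & SPEC =====
def Spec_getStatus (returncode : Int) (returnsignal : Int) (output : String) (isTimeout : Bool) (out : String) : Prop := out = getStatus_alt returncode returnsignal output isTimeout
instance (returncode : Int) (returnsignal : Int) (output : String) (isTimeout : Bool) (out : String) : Decidable (Spec_getStatus returncode returnsignal output isTimeout out) := by unfold Spec_getStatus; infer_instance

-- ===== CLAIM (what is proved, stated in full; the proofs are below) =====
def Claim_equal_getStatus : Prop := ∀ (returncode : Int) (returnsignal : Int) (output : String) (isTimeout : Bool), Dom_getStatus returncode returnsignal output isTimeout → Spec_getStatus returncode returnsignal output isTimeout (getStatus returncode returnsignal output isTimeout)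

-- ===== LEMMAS AND PROOFS =====
-- Last match in a forward fold = first match of the reverse scan.
theorem loop_reverse_eq_foldl (returncode : Int) (ls : List String) :
    getStatusAltLoop returncode ls.reverse =
      ls.foldl (fun status line =>
        if PySem.Str.startswith line "Error found! The system is unsafe :-(" then "UNSAFE"
        else if PySem.Str.startswith line "No error found.  The system is safe :-)" then "SAFE"
        else if returncode == 2 && PySem.Str.startswith line "Fatal error: out of memory." then "OUT OF MEMORY"
        else if returncode == 2 && PySem.Str.startswith line "Fatal error: exception Sys_error(\"Broken pipe\")" then "EXCEPTION"
        else if returncode == 2 && PySem.Str.startswith line "Ack! The gremlins again!: Sys_error(\"Broken pipe\")" then "TIMEOUT"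
        else status) "UNKNOWN" := by
  induction ls using List.reverseRecOn with
  | nil => rfl
  | append_singleton l x ih =>
    rw [List.reverse_append, List.reverse_singleton, List.singleton_append,
        List.foldl_append, List.foldl_cons, List.foldl_nil]
    simp only [getStatusAltLoop]
    rw [← ih]
    generalize getStatusAltLoop returncode l.reverse = acc
    generalize (returncode == 2) = b0
    generalize PySem.Str.startswith x "Error found! The system is unsafe :-(" = b1
    generalize PySem.Str.startswith x "No error found.  The system is safe :-)" = b2
    generalize PySem.Str.startswith x "Fatal error: out of memory." = b3
    generalize PySem.Str.startswith x "Fatal error: exception Sys_error(\"Broken pipe\")" = b4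
    generalize PySem.Str.startswith x "Ack! The gremlins again!: Sys_error(\"Broken pipe\")" = b5
    cases b0 <;> cases b1 <;> cases b2 <;> cases b3 <;> cases b4 <;> cases b5 <;> rfl

-- ===== VERDICT (by name: the statement is the Claim_ definition above) =====
theorem getStatus_spec : Claim_equal_getStatus := by
  intro returncode returnsignal output isTimeout _
  unfold Spec_getStatus getStatus getStatus_alt
  exact (loop_reverse_eq_foldl returncode (PySem.Str.splitlines output)).symm
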